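-- pv_equiv track=rewrite | github.com/santiagodaros/facultad | introduccion_a_la_programacion/python/guia_8.py | maximo_lista
-- ===== SOURCE A (Python) =====
-- def maximo_lista(lista:list)->int:
--     maximo_actual:int=0
--     for i in range(len(lista)):
--         if lista[i] >= maximo_actual:
--             maximo_actual=lista[i]
--             i+=1
--
--         else:
--             i+=1
--
--     return maximo_actual
-- ===== SOURCE B (Python) =====
-- def maximo_lista(lista: list) -> int:
--     return sorted(lista + [0])[-1]
-- ===== Notes on version B (the rewrite author's own statement) =====
-- stated objective: simpler
-- what changed: Replaces A's indexed comparison scan with a one-liner that sorts the list with an appended zero floor and reads the maximum off as the last element of the sorted order.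
import Mathlib
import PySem

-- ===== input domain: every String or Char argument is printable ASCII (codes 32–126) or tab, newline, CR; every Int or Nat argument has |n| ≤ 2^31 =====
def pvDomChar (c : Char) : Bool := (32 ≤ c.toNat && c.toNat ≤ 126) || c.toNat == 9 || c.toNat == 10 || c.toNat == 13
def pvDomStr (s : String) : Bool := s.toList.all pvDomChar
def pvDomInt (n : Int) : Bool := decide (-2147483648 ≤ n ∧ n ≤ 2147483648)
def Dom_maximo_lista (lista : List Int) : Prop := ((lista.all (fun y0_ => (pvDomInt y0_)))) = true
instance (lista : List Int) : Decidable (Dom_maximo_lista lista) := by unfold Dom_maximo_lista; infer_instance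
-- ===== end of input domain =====

-- B replaces A's indexed accumulator scan with sort-then-take-last (a zero floor is appended before sorting); objective: simpler.


-- ===== PORT A =====
def maximo_lista (lista : List Int) : Int :=
  (PySem.List.pyRange 0 (lista.length : Int) 1).foldl
    (fun maximo_actual i =>
      if PySem.List.pyGetD lista i 0 ≥ maximo_actual then PySem.List.pyGetD lista i 0
      else maximo_actual) 0

-- ===== PORT B =====
def maximo_lista_alt (lista : List Int) : Int :=
  (PySem.List.pyGet? (PySem.List.sorted (lista ++ [0]) (fun x => x) false) (-1)).getD 0

-- ===== PRECONDITION & SPEC =====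
def Spec_maximo_lista (lista : List Int) (out : Int) : Prop := out = maximo_lista_alt lista
instance (lista : List Int) (out : Int) : Decidable (Spec_maximo_lista lista out) := by unfold Spec_maximo_lista; infer_instance

-- ===== CLAIM (what is proved, stated in full; the proofs are below) =====
def Claim_equal_maximo_lista : Prop := ∀ (lista : List Int), Dom_maximo_lista lista → Spec_maximo_lista lista (maximo_lista lista)

-- ===== LEMMAS AND PROOFS =====

-- A's scan is foldl max 0.
theorem maximo_lista_eq_foldl_max (lista : List Int) :
    maximo_lista lista = lista.foldl max 0 := by
  unfold maximo_lista
  rw [PySem.List.foldl_pyRange_zero_pyGetD' lista 0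
      (fun acc x => if x ≥ acc then x else acc) 0]
  have hf : (fun (acc x : Int) => if x ≥ acc then x else acc) = max := by
    funext acc x
    simp [max_def, ge_iff_le]
  rw [hf]

theorem le_foldl_max (l : List Int) (a : Int) : a ≤ l.foldl max a := by
  induction l generalizing a with
  | nil => simp
  | cons x t ih => exact le_trans (le_max_left a x) (ih (max a x))

theorem mem_le_foldl_max (l : List Int) (a : Int) : ∀ y ∈ l, y ≤ l.foldl max a := by
  induction l generalizing a with
  | nil => simp
  | cons x t ih =>
    intro y hy
    rcases List.mem_cons.mp hy with h | h
    · rw [h]; exact le_trans (le_max_right a x) (le_foldl_max t (max a x))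
    · exact ih (max a x) y h

theorem foldl_max_mem (l : List Int) (a : Int) : l.foldl max a = a ∨ l.foldl max a ∈ l := by
  induction l generalizing a with
  | nil => simp
  | cons x t ih =>
    rcases ih (max a x) with h | h
    · rw [List.foldl_cons, h]
      rcases le_total a x with hx | hx
      · right; simp [max_eq_right hx]
      · left; simp [max_eq_left hx]
    · right; exact List.mem_cons_of_mem _ h

-- in a ≤-pairwise list, every element is ≤ the last
theorem pairwise_le_getLast (l : List Int) (h : l.Pairwise (· ≤ ·)) (hne : l ≠ []) :
    ∀ y ∈ l, y ≤ l.getLast hne := by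
  induction l with
  | nil => simp at hne
  | cons x t ih =>
    intro y hy
    cases t with
    | nil => simp at hy; simp [hy]
    | cons z u =>
      rw [List.getLast_cons (by simp)]
      rcases List.mem_cons.mp hy with h1 | h1
      · subst h1
        have hx : y ≤ z := (List.pairwise_cons.mp h).1 z (by simp)
        exact le_trans hx (ih (List.pairwise_cons.mp h).2 (by simp) z (by simp))
      · exact ih (List.pairwise_cons.mp h).2 (by simp) y h1

theorem maximo_lista_spec_aux (lista : List Int) :
    maximo_lista lista = maximo_lista_alt lista := by
  rw [maximo_lista_eq_foldl_max]
  unfold maximo_lista_alt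
  set s := PySem.List.sorted (lista ++ [0]) (fun x => x) false with hs
  have hsne : s ≠ [] := by
    rw [hs, Ne, PySem.List.sorted_eq_nil_iff]; simp
  rw [PySem.List.pyGet?_neg_one, List.getLast?_eq_some_getLast hsne, Option.getD_some]
  set L := s.getLast hsne with hL
  have hperm : s.Perm (lista ++ [0]) := PySem.List.sorted_perm _ _ _
  have hpw : s.Pairwise (· ≤ ·) := by
    have := PySem.List.sorted_pairwise (xs := lista ++ [0]) (key := fun x => x)
    simpa [hs] using this
  have hLmem : L ∈ lista ++ [0] := hperm.mem_iff.mp (List.getLast_mem hsne)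
  have hub : ∀ y ∈ lista ++ [0], y ≤ L := by
    intro y hy
    exact pairwise_le_getLast s hpw hsne y (hperm.mem_iff.mpr hy)
  apply le_antisymm
  · -- foldl max 0 lista ≤ L
    rcases foldl_max_mem lista 0 with h | h
    · rw [h]; exact hub 0 (by simp)
    · exact hub _ (by simp [h])
  · -- L ≤ foldl max 0 lista
    rcases List.mem_append.mp hLmem with h | h
    · exact mem_le_foldl_max lista 0 L h
    · simp at h; rw [h]; exact le_foldl_max lista 0

-- ===== VERDICT (by name: the statement is the Claim_ definition above) =====
theorem maximo_lista_spec : Claim_equal_maximo_lista := by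
  intro lista _
  unfold Spec_maximo_lista
  exact maximo_lista_spec_aux lista
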